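-- pv_equiv track=rewrite | github.com/aumhaa/monomodular | Python Scripts/Lemur256/Lemur256.py | generate_strip_string
-- ===== SOURCE A (Python) =====
-- def generate_strip_string(display_string):
-- 	NUM_CHARS_PER_DISPLAY_STRIP = 9
-- 	if (not display_string):
-- 		return ('`_')
-- 	if ((len(display_string.strip()) > (NUM_CHARS_PER_DISPLAY_STRIP - 1)) and (display_string.endswith('dB') and (display_string.find('.') != -1))):
-- 		display_string = display_string[:-2]
-- 	if (len(display_string) > (NUM_CHARS_PER_DISPLAY_STRIP - 1)):
-- 		for um in [' ',
-- 		 'i',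
-- 		 'o',
-- 		 'u',
-- 		 'e',
-- 		 'a']:
-- 			while ((len(display_string) > (NUM_CHARS_PER_DISPLAY_STRIP - 1)) and (display_string.rfind(um, 1) != -1)):
-- 				um_pos = display_string.rfind(um, 1)
-- 				display_string = (display_string[:um_pos] + display_string[(um_pos + 1):])
-- 	else:
-- 		display_string = display_string.center((NUM_CHARS_PER_DISPLAY_STRIP - 1))
-- 	ret = u''
-- 	for i in range((NUM_CHARS_PER_DISPLAY_STRIP - 1)):
-- 		if ((ord(display_string[i]) > 127) or (ord(display_string[i]) < 0)):
-- 			ret += ' '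
-- 		else:
-- 			ret += display_string[i]
--
-- 	ret += ' '
-- 	assert (len(ret) == NUM_CHARS_PER_DISPLAY_STRIP)
-- 	return '`' + ret.replace(' ', '_')
-- ===== SOURCE B (Python) =====
-- def _drop_rightmost(s, ch, r):
--     """Remove the rightmost r occurrences of ch from s (one reverse pass)."""
--     out = []
--     for c in reversed(s):
--         if r > 0 and c == ch:
--             r -= 1
--         else:
--             out.append(c)
--     out.reverse()
--     return ''.join(out)
--
--
-- def generate_strip_string(display_string):
--     if not display_string:
--         return '`_'
--     s = display_string
--     if len(s.strip()) > 8 and s.endswith('dB') and '.' in s: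
--         s = s[:-2]
--     if len(s) > 8:
--         # Drop removable characters by priority category, rightmost first,
--         # never touching index 0, until at most 8 characters remain.
--         head, tail = s[0], s[1:]
--         for um in ' iouea':
--             excess = len(tail) - 7
--             if excess > 0:
--                 tail = _drop_rightmost(tail, um, min(excess, tail.count(um)))
--         s = head + tail
--     else:
--         pad = 8 - len(s)
--         s = ' ' * (pad // 2) + s + ' ' * (pad - pad // 2)
--     body = ''.join(c if ord(c) <= 127 else ' ' for c in s[:8])
--     return '`' + (body + ' ').replace(' ', '_')
-- ===== Notes on version B (the rewrite author's own statement) =====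
-- stated objective: faster
-- what changed: A shrinks an over-long string by repeatedly calling rfind and rebuilding the whole string once per deleted character (quadratic when many characters must be removed); B keeps the head fixed and, for each priority category in order, computes once how many characters must still go and strips that many rightmost occurrences in a single reverse pass (linear).
import Mathlib
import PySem

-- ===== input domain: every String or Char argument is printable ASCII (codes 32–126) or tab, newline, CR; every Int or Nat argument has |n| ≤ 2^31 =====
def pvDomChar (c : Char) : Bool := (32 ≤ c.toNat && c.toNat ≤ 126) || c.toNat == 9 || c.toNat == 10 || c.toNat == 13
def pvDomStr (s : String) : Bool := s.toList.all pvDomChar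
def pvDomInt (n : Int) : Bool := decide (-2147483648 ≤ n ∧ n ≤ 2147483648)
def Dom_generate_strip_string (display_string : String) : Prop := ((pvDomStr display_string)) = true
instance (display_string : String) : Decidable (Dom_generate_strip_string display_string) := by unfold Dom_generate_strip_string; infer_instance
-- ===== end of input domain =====

-- B replaces A's quadratic rfind-and-rebuild deletion loop by one linear reverse pass per
-- priority category (objective: faster; same return value).

-- ===== PORT A =====
-- display_string[:um_pos] + display_string[um_pos+1:]
def gssRemove (s : List Char) (p : Int) : List Char :=
  PySem.List.slice s none (some p) ++ PySem.List.slice s (some (p + 1)) none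

-- The next four lemmas are cited by the termination proof of the while-loop port below.
theorem gssPrefix_ne_nil {sub l : List Char} (hs : sub ≠ []) (h : sub.isPrefixOf l = true) :
    l ≠ [] := by
  cases l with
  | nil => cases sub with
    | nil => exact absurd rfl hs
    | cons a as => simp [List.isPrefixOf] at h
  | cons x xs => simp

theorem gssRfindGo_bound (t sub : List Char) (hsub : sub ≠ []) :
    ∀ j : Nat, PySem.Chars.rfind.go t sub j = -1 ∨
      (0 ≤ PySem.Chars.rfind.go t sub j ∧ PySem.Chars.rfind.go t sub j < t.length) := by
  intro j
  induction j with
  | zero =>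
    rw [PySem.Chars.rfind.go]
    by_cases hp : sub.isPrefixOf t = true
    · right
      have hpos := List.length_pos_of_ne_nil (gssPrefix_ne_nil hsub hp)
      simp [hp]
      omega
    · left; simp [hp]
  | succ j ih =>
    rw [PySem.Chars.rfind.go]
    by_cases hp : sub.isPrefixOf (t.drop (j + 1)) = true
    · right
      have hne := gssPrefix_ne_nil hsub hp
      have hlt : j + 1 < t.length := by
        by_contra hge
        exact hne (List.drop_eq_nil_of_le (by omega))
      simp [hp]
      omega
    · simp [hp]
      exact ih

theorem gssRfindFrom1_eq_rfind (hd : Char) (t : List Char) (c : Char) :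
    PySem.Chars.rfindFrom (hd :: t) [c] 1 none =
      if PySem.Chars.rfind t [c] = -1 then -1 else 1 + PySem.Chars.rfind t [c] := by
  unfold PySem.Chars.rfindFrom
  simp

theorem gssRfindFrom1_bound (s : List Char) (c : Char)
    (h : PySem.Chars.rfindFrom s [c] 1 none ≠ -1) :
    1 ≤ PySem.Chars.rfindFrom s [c] 1 none ∧
      PySem.Chars.rfindFrom s [c] 1 none < s.length := by
  cases s with
  | nil =>
    exfalso
    apply h
    simp [PySem.Chars.rfindFrom]
  | cons hd t =>
    rw [gssRfindFrom1_eq_rfind] at h ⊢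
    by_cases hr : PySem.Chars.rfind t [c] = -1
    · simp [hr] at h
    · rcases gssRfindGo_bound t [c] (by simp) t.length with hb | hb
      · exact absurd hb hr
      · rw [if_neg hr,
          show PySem.Chars.rfind t [c] = PySem.Chars.rfind.go t [c] t.length from rfl]
        simp only [List.length_cons]
        constructor
        · omega
        · push_cast
          omega

theorem gssRemove_length (s : List Char) (p : Int) (h1 : 1 ≤ p) (h2 : p < s.length) :
    (gssRemove s p).length < s.length := by
  unfold gssRemove
  rw [PySem.List.slice_to _ (by omega), PySem.List.slice_from _ (by omega)]
  simp only [List.length_append, List.length_take, List.length_drop]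
  omega

-- while len(s) > 8 and s.rfind(um, 1) != -1: delete the found character
def gssLoopA (c : Char) (s : List Char) : List Char :=
  if h : 8 < s.length ∧ PySem.Chars.rfindFrom s [c] 1 none ≠ -1 then
    gssLoopA c (gssRemove s (PySem.Chars.rfindFrom s [c] 1 none))
  else s
  termination_by s.length
  decreasing_by
    exact gssRemove_length s _ (gssRfindFrom1_bound s c h.2).1 (gssRfindFrom1_bound s c h.2).2

-- s.center(8): for the even width 8 CPython pads (8-len)//2 on the left, the rest on the right
def gssCenter8 (s : List Char) : List Char :=
  if 8 ≤ s.length then s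
  else
    List.replicate ((8 - s.length) / 2) ' ' ++ s ++
      List.replicate ((8 - s.length) - (8 - s.length) / 2) ' '

def generate_strip_string (display_string : String) : String :=
  let l := display_string.toList
  if l = [] then "`_"
  else
    let l1 := if 8 < (PySem.Chars.strip l).length ∧
                 PySem.Chars.endswith l ['d', 'B'] = true ∧ PySem.Chars.find l ['.'] ≠ -1
              then PySem.List.slice l none (some (-2)) else l
    let l2 := if 8 < l1.length
              then [' ', 'i', 'o', 'u', 'e', 'a'].foldl (fun s c => gssLoopA c s) l1
              else gssCenter8 l1
    -- for i in range(8): ret += ' ' if the code point is outside 0..127 else the char;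
    -- l2 always has ≥ 8 chars (proved below), so Python's l2[i] never raises; ported with a default
    let ret := (PySem.List.pyRange 0 8 1).foldl (fun acc i =>
        if 127 < ((PySem.List.pyGetD l2 i ' ').toNat : Int) ∨
           ((PySem.List.pyGetD l2 i ' ').toNat : Int) < 0
        then acc ++ [' '] else acc ++ [PySem.List.pyGetD l2 i ' ']) []
    String.ofList ('`' :: PySem.Chars.replace (ret ++ [' ']) [' '] ['_'])

-- ===== PORT B =====
-- _drop_rightmost: one reverse pass skipping the first r matches
def gssSkip (c : Char) : Int → List Char → List Char
  | _, [] => []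
  | r, x :: xs => if 0 < r ∧ x = c then gssSkip c (r - 1) xs else x :: gssSkip c r xs

def gssDropRightmost (s : List Char) (c : Char) (r : Int) : List Char :=
  (gssSkip c r s.reverse).reverse

-- one category of B's for-loop over the tail
def gssStepB (t : List Char) (c : Char) : List Char :=
  if 0 < (t.length : Int) - 7 then
    gssDropRightmost t c (min ((t.length : Int) - 7) (t.count c : Int))
  else t

def generate_strip_string_alt (display_string : String) : String :=
  let l := display_string.toList
  if l = [] then "`_"
  else
    let l1 := if 8 < (PySem.Chars.strip l).length ∧
                 PySem.Chars.endswith l ['d', 'B'] = true ∧ PySem.Chars.isIn ['.'] l = true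
              then PySem.List.slice l none (some (-2)) else l
    let l2 := if 8 < l1.length
              then PySem.List.pyGetD l1 0 ' ' ::
                     [' ', 'i', 'o', 'u', 'e', 'a'].foldl gssStepB
                       (PySem.List.slice l1 (some 1) none)
              else
                List.replicate ((8 - l1.length) / 2) ' ' ++ l1 ++
                  List.replicate ((8 - l1.length) - (8 - l1.length) / 2) ' '
    let body := (PySem.List.slice l2 none (some 8)).map
        (fun ch => if ch.toNat ≤ 127 then ch else ' ')
    String.ofList ('`' :: PySem.Chars.replace (body ++ [' ']) [' '] ['_'])

-- ===== PRECONDITION & SPEC =====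
def Spec_generate_strip_string (display_string : String) (out : String) : Prop := out = generate_strip_string_alt display_string
instance (display_string : String) (out : String) : Decidable (Spec_generate_strip_string display_string out) := by unfold Spec_generate_strip_string; infer_instance

-- ===== CLAIM (what is proved, stated in full; the proofs are below) =====
def Claim_equal_generate_strip_string : Prop := ∀ (display_string : String), Dom_generate_strip_string display_string → Spec_generate_strip_string display_string (generate_strip_string display_string)

-- ===== LEMMAS AND PROOFS =====

theorem gssSkip_of_nonpos (c : Char) (r : Int) (l : List Char) (h : r ≤ 0) :
    gssSkip c r l = l := by
  induction l with
  | nil => rfl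
  | cons x xs ih => simp [gssSkip, show ¬(0 < r) by omega, ih]

theorem gssSkip_append_not_mem (c : Char) (r : Int) (w rest : List Char) (h : c ∉ w) :
    gssSkip c r (w ++ rest) = w ++ gssSkip c r rest := by
  induction w generalizing r with
  | nil => rfl
  | cons x xs ih =>
    simp only [List.mem_cons, not_or] at h
    have hxc : ¬(x = c) := fun hc => h.1 hc.symm
    simp [gssSkip, hxc, ih _ h.2]

theorem gssDropRightmost_of_nonpos (s : List Char) (c : Char) (r : Int) (h : r ≤ 0) :
    gssDropRightmost s c r = s := by
  simp [gssDropRightmost, gssSkip_of_nonpos c r _ h]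

theorem gssDropRightmost_succ (u v : List Char) (c : Char) (r : Int)
    (hv : c ∉ v) (hr : 0 ≤ r) :
    gssDropRightmost (u ++ c :: v) c (r + 1) = gssDropRightmost (u ++ v) c r := by
  have hv' : c ∉ v.reverse := by simpa using hv
  unfold gssDropRightmost
  rw [show (u ++ c :: v).reverse = v.reverse ++ c :: u.reverse by simp,
      gssSkip_append_not_mem c (r + 1) _ _ hv',
      show (u ++ v).reverse = v.reverse ++ u.reverse by simp,
      gssSkip_append_not_mem c r _ _ hv']
  have hstep : gssSkip c (r + 1) (c :: u.reverse) = gssSkip c r u.reverse := by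
    simp [gssSkip, show (0:Int) < r + 1 by omega]
  rw [hstep]

theorem gssSkip_length_ge (c : Char) (r : Int) (l : List Char) :
    l.length - r.toNat ≤ (gssSkip c r l).length := by
  induction l generalizing r with
  | nil => simp [gssSkip]
  | cons x xs ih =>
    by_cases hc : 0 < r ∧ x = c
    · have := ih (r - 1)
      simp only [gssSkip, if_pos hc, List.length_cons]
      omega
    · have := ih r
      simp only [gssSkip, if_neg hc, List.length_cons]
      omega

theorem gssStepB_length (t : List Char) (c : Char) (h : 7 ≤ t.length) :
    7 ≤ (gssStepB t c).length := by
  unfold gssStepB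
  split_ifs with h7
  · have := gssSkip_length_ge c (min ((t.length : Int) - 7) (t.count c : Int)) t.reverse
    unfold gssDropRightmost
    simp only [List.length_reverse] at this ⊢
    omega
  · omega

theorem gssFoldB_length (cs : List Char) (t : List Char) (h : 7 ≤ t.length) :
    7 ≤ (cs.foldl gssStepB t).length := by
  induction cs generalizing t with
  | nil => simpa using h
  | cons c cs ih => exact ih _ (gssStepB_length t c h)

theorem gssPrefixSingleton (c : Char) (l : List Char) :
    [c].isPrefixOf l = true ↔ ∃ l', l = c :: l' := by
  cases l with
  | nil => simp [List.isPrefixOf]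
  | cons x xs =>
    simp only [List.isPrefixOf, Bool.and_true, beq_iff_eq, List.cons.injEq]
    exact ⟨fun hc => ⟨xs, hc.symm, rfl⟩, fun ⟨l', hc, _⟩ => hc.symm⟩

theorem gssPrefixSingleton_false (c : Char) (l : List Char) (h : c ∉ l) :
    [c].isPrefixOf l = false := by
  rw [Bool.eq_false_iff]
  intro hp
  obtain ⟨l', rfl⟩ := (gssPrefixSingleton c l).1 hp
  simp at h

theorem gssDecomp (c : Char) (t : List Char) (h : c ∈ t) :
    ∃ u v, t = u ++ c :: v ∧ c ∉ v := by
  have h' : c ∈ t.reverse := by simpa using h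
  obtain ⟨p, q, hcp, heq, -⟩ := List.exists_erase_eq h'
  refine ⟨q.reverse, p.reverse, ?_, by simpa using hcp⟩
  have := congrArg List.reverse heq
  simpa using this

theorem gssRfindGo_notmem (c : Char) (t : List Char) (h : c ∉ t) :
    ∀ j : Nat, PySem.Chars.rfind.go t [c] j = -1 := by
  intro j
  induction j with
  | zero =>
    rw [PySem.Chars.rfind.go, gssPrefixSingleton_false c t h]
    simp only [Bool.false_eq_true, if_false]
  | succ j ih =>
    have hdr : c ∉ t.drop (j + 1) := fun hm => h (List.mem_of_mem_drop hm)
    rw [PySem.Chars.rfind.go, gssPrefixSingleton_false c _ hdr]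
    simp only [Bool.false_eq_true, if_false]
    exact ih

theorem gssRfindGo_at (t : List Char) (c : Char) (j : Nat)
    (h : [c].isPrefixOf (t.drop j) = true) : PySem.Chars.rfind.go t [c] j = j := by
  cases j with
  | zero =>
    rw [PySem.Chars.rfind.go]
    simp only [List.drop_zero] at h
    simp [h]
  | succ m =>
    rw [PySem.Chars.rfind.go]
    simp [h]

theorem gssRfindGo_decomp (c : Char) (u v : List Char) (hv : c ∉ v) :
    ∀ d : Nat, PySem.Chars.rfind.go (u ++ c :: v) [c] (u.length + d) = u.length := by
  intro d
  induction d with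
  | zero =>
    have hpref : [c].isPrefixOf ((u ++ c :: v).drop u.length) = true := by
      rw [List.drop_left]
      exact (gssPrefixSingleton c _).2 ⟨v, rfl⟩
    simpa using gssRfindGo_at _ c u.length hpref
  | succ d ih =>
    have hdrop : (u ++ c :: v).drop (u.length + d + 1) = v.drop d := by
      have h1 : u ++ c :: v = (u ++ [c]) ++ v := by simp
      have h2 : u.length + d + 1 = (u ++ [c]).length + d := by simp; omega
      rw [h1, h2, List.drop_append]
      simp
    have hdr : c ∉ (u ++ c :: v).drop (u.length + d + 1) := by
      intro hm
      rw [hdrop] at hm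
      exact hv (List.mem_of_mem_drop hm)
    rw [show u.length + (d + 1) = (u.length + d) + 1 by omega, PySem.Chars.rfind.go,
      gssPrefixSingleton_false c _ hdr]
    simp only [Bool.false_eq_true, if_false]
    exact ih

theorem gssRfind_decomp (c : Char) (u v : List Char) (hv : c ∉ v) :
    PySem.Chars.rfind (u ++ c :: v) [c] = u.length := by
  have h := gssRfindGo_decomp c u v hv (v.length + 1)
  rw [show PySem.Chars.rfind (u ++ c :: v) [c] =
      PySem.Chars.rfind.go (u ++ c :: v) [c] (u ++ c :: v).length from rfl,
    show (u ++ c :: v).length = u.length + (v.length + 1) by simp]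
  exact h

theorem gssRfind_notmem (c : Char) (t : List Char) (h : c ∉ t) :
    PySem.Chars.rfind t [c] = -1 :=
  gssRfindGo_notmem c t h t.length

theorem gssRfindFrom1_decomp (c hd : Char) (u v : List Char) (hv : c ∉ v) :
    PySem.Chars.rfindFrom (hd :: (u ++ c :: v)) [c] 1 none = 1 + u.length := by
  rw [gssRfindFrom1_eq_rfind, gssRfind_decomp c u v hv, if_neg (by omega)]

theorem gssRfindFrom1_notmem (c hd : Char) (t : List Char) (h : c ∉ t) :
    PySem.Chars.rfindFrom (hd :: t) [c] 1 none = -1 := by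
  rw [gssRfindFrom1_eq_rfind, gssRfind_notmem c t h, if_pos rfl]

theorem gssRemove_decomp (hd c : Char) (u v : List Char) :
    gssRemove (hd :: (u ++ c :: v)) (1 + u.length) = hd :: (u ++ v) := by
  unfold gssRemove
  rw [PySem.List.slice_to _ (by omega), PySem.List.slice_from _ (by omega)]
  have h1 : ((1 : Int) + u.length).toNat = (hd :: u).length := by simp; omega
  have h2 : ((1 : Int) + u.length + 1).toNat = (hd :: (u ++ [c])).length := by simp; omega
  rw [h1, h2, show hd :: (u ++ c :: v) = (hd :: u) ++ (c :: v) by simp, List.take_left,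
    show (hd :: u) ++ (c :: v) = (hd :: (u ++ [c])) ++ v by simp, List.drop_left]
  simp

theorem gssStepB_remove (c : Char) (u v : List Char) (hv : c ∉ v)
    (h7 : 7 < (u ++ c :: v).length) :
    gssStepB (u ++ c :: v) c = gssStepB (u ++ v) c := by
  have hlen : (u ++ c :: v).length = (u ++ v).length + 1 := by simp; omega
  have hcnt : (u ++ c :: v).count c = (u ++ v).count c + 1 := by
    simp [List.count_append]
    omega
  set n := (u ++ v).length with hn
  set k := ((u ++ v).count c : Int) with hk
  have hmin : min (((u ++ c :: v).length : Int) - 7) ((u ++ c :: v).count c : Int)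
      = min ((n : Int) - 7) k + 1 := by
    rw [hlen, hcnt]
    push_cast
    omega
  have hk0 : (0:Int) ≤ k := by positivity
  have hn7 : 7 ≤ n := by omega
  unfold gssStepB
  rw [if_pos (by rw [hlen]; push_cast; omega), hmin]
  rw [gssDropRightmost_succ u v c _ hv (by omega)]
  by_cases hpos : 0 < (n : Int) - 7
  · rw [if_pos (by omega)]
  · rw [if_neg (by omega)]
    have : min ((n : Int) - 7) k ≤ 0 := by
      have : (0:Int) ≤ k := by positivity
      omega
    exact gssDropRightmost_of_nonpos _ c _ this

-- the heart: A's while-loop for one category equals B's single-pass step, head preserved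
theorem gssMain (c hd : Char) (t : List Char) :
    gssLoopA c (hd :: t) = hd :: gssStepB t c := by
  suffices H : ∀ n (t : List Char), t.length = n → gssLoopA c (hd :: t) = hd :: gssStepB t c from
    H t.length t rfl
  intro n
  induction n using Nat.strong_induction_on with
  | _ n ih =>
    intro t ht
    by_cases h7 : 7 < t.length
    · by_cases hm : c ∈ t
      · obtain ⟨u, v, rfl, hv⟩ := gssDecomp c t hm
        rw [gssLoopA,
          dif_pos ⟨by simp only [List.length_cons]; omega,
            by rw [gssRfindFrom1_decomp c hd u v hv]; omega⟩,
          gssRfindFrom1_decomp c hd u v hv, gssRemove_decomp hd c u v,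
          gssStepB_remove c u v hv h7]
        have hlt : (u ++ v).length < n := by
          simp only [List.length_append, List.length_cons] at ht ⊢
          omega
        exact ih (u ++ v).length hlt (u ++ v) rfl
      · rw [gssLoopA, dif_neg (fun hc => hc.2 (gssRfindFrom1_notmem c hd t hm))]
        have : gssStepB t c = t := by
          unfold gssStepB
          rw [if_pos (by omega),
            show ((t.count c : Int)) = 0 by
              rw [List.count_eq_zero_of_not_mem hm]; rfl]
          exact gssDropRightmost_of_nonpos t c _ (min_le_right _ _)
        rw [this]
    · rw [gssLoopA, dif_neg (fun hc => h7 (by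
        have := hc.1
        simp only [List.length_cons] at this
        omega))]
      have : gssStepB t c = t := by
        unfold gssStepB
        rw [if_neg (by omega)]
      rw [this]

theorem gssFold (cs : List Char) (hd : Char) (t : List Char) :
    cs.foldl (fun s c => gssLoopA c s) (hd :: t) = hd :: cs.foldl gssStepB t := by
  induction cs generalizing t with
  | nil => rfl
  | cons c cs ih =>
    simp only [List.foldl_cons]
    rw [gssMain c hd t, ih]

-- A's indexed range-8 loop equals B's map over the first 8 chars, for >= 8 chars
theorem gssSan (ch : Char) :
    (if 127 < ((ch.toNat : Int)) ∨ ((ch.toNat : Int)) < 0 then ' ' else ch) =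
      (if ch.toNat ≤ 127 then ch else ' ') := by
  by_cases h : ch.toNat ≤ 127
  · rw [if_neg (by omega), if_pos h]
  · rw [if_pos (by omega), if_neg h]

theorem gssAssemble (l2 : List Char) (h : 8 ≤ l2.length) :
    (PySem.List.pyRange 0 8 1).foldl (fun acc i =>
        if 127 < ((PySem.List.pyGetD l2 i ' ').toNat : Int) ∨
           ((PySem.List.pyGetD l2 i ' ').toNat : Int) < 0
        then acc ++ [' '] else acc ++ [PySem.List.pyGetD l2 i ' ']) [] =
      (PySem.List.slice l2 none (some 8)).map
        (fun ch => if ch.toNat ≤ 127 then ch else ' ') := by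
  have hfun : (fun (acc : List Char) (i : Int) =>
      if 127 < ((PySem.List.pyGetD l2 i ' ').toNat : Int) ∨
         ((PySem.List.pyGetD l2 i ' ').toNat : Int) < 0
      then acc ++ [' '] else acc ++ [PySem.List.pyGetD l2 i ' ']) =
      (fun acc i => acc ++ [if (PySem.List.pyGetD l2 i ' ').toNat ≤ 127
                            then PySem.List.pyGetD l2 i ' ' else ' ']) := by
    funext acc i
    rw [← gssSan]
    split_ifs <;> rfl
  rw [hfun, PySem.List.foldl_append_singleton_eq_map]
  rw [show PySem.List.pyRange 0 8 1 = [0, 1, 2, 3, 4, 5, 6, 7] from by decide]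
  rcases l2 with _ | ⟨x0, _ | ⟨x1, _ | ⟨x2, _ | ⟨x3, _ | ⟨x4, _ | ⟨x5, _ | ⟨x6, _ | ⟨x7, rest⟩⟩⟩⟩⟩⟩⟩⟩ <;>
    simp only [List.length_nil, List.length_cons] at h <;> try omega
  rw [PySem.List.slice_to _ (by omega)]
  simp
  norm_num [PySem.List.pyGetD_ofNat']

theorem gssCenter8_eq (s : List Char) (h : s.length ≤ 8) :
    gssCenter8 s =
      List.replicate ((8 - s.length) / 2) ' ' ++ s ++
        List.replicate ((8 - s.length) - (8 - s.length) / 2) ' ' := by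
  unfold gssCenter8
  split_ifs with h8
  · have : s.length = 8 := by omega
    simp [this]
  · rfl

theorem gssCenter8_length (s : List Char) (h : s.length ≤ 8) :
    (gssCenter8 s).length = 8 := by
  unfold gssCenter8
  split_ifs with h8
  · omega
  · simp
    omega

-- ===== VERDICT (by name: the statement is the Claim_ definition above) =====
theorem generate_strip_string_spec : Claim_equal_generate_strip_string := by
  intro s _
  unfold Spec_generate_strip_string generate_strip_string generate_strip_string_alt
  by_cases hnil : s.toList = []
  · simp [hnil]
  · simp only [if_neg hnil]
    have h1 : PySem.Chars.find s.toList ['.'] ≠ -1 ↔ ['.'] <:+: s.toList :=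
      PySem.Chars.find_ne_neg_one_iff _ _
    have h2 : PySem.Chars.isIn ['.'] s.toList = true ↔ ['.'] <:+: s.toList :=
      PySem.Chars.isIn_iff_infix _ _
    have hcond : (8 < (PySem.Chars.strip s.toList).length ∧
        PySem.Chars.endswith s.toList ['d', 'B'] = true ∧
        PySem.Chars.find s.toList ['.'] ≠ -1) ↔
        (8 < (PySem.Chars.strip s.toList).length ∧
        PySem.Chars.endswith s.toList ['d', 'B'] = true ∧
        PySem.Chars.isIn ['.'] s.toList = true) :=
      ⟨fun ⟨a, b, c⟩ => ⟨a, b, h2.2 (h1.1 c)⟩, fun ⟨a, b, c⟩ => ⟨a, b, h1.2 (h2.1 c)⟩⟩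
    rw [if_congr hcond rfl rfl]
    generalize (if 8 < (PySem.Chars.strip s.toList).length ∧
        PySem.Chars.endswith s.toList ['d', 'B'] = true ∧
        PySem.Chars.isIn ['.'] s.toList = true
      then PySem.List.slice s.toList none (some (-2)) else s.toList) = l1
    by_cases h8 : 8 < l1.length
    · rw [if_pos h8, if_pos h8]
      obtain ⟨hd, t, rfl⟩ : ∃ hd t, l1 = hd :: t := by
        cases l1 with
        | nil => simp at h8
        | cons a b => exact ⟨a, b, rfl⟩
      rw [gssFold, PySem.List.pyGetD_zero_cons, PySem.List.slice_from_one]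
      simp only [List.tail_cons]
      have hlen : 8 ≤ (hd :: [' ', 'i', 'o', 'u', 'e', 'a'].foldl gssStepB t).length := by
        simp only [List.length_cons]
        have := gssFoldB_length [' ', 'i', 'o', 'u', 'e', 'a'] t
          (by simp only [List.length_cons] at h8; omega)
        omega
      rw [gssAssemble _ hlen]
    · rw [if_neg h8, if_neg h8]
      have hc8 : l1.length ≤ 8 := by omega
      rw [gssCenter8_eq l1 hc8]
      have hclen : (List.replicate ((8 - l1.length) / 2) ' ' ++ l1 ++
          List.replicate ((8 - l1.length) - (8 - l1.length) / 2) ' ').length = 8 := by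
        rw [← gssCenter8_eq l1 hc8, gssCenter8_length l1 hc8]
      rw [gssAssemble _ (by omega)]
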